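-- pv_equiv track=rewrite | github.com/harryduffy/SmartForms | Helpers/helper_functions.py | replace_table
-- ===== SOURCE A (Python) =====
-- def replace_table(table, content, form_dict):
--
--     new_content = content
--
--     values = list(form_dict.values())
--
--     string_values = []
--     for value in values:
--         string_values.append(value[0])
--
--     cell_counter = len(string_values)
--     iterator = 0
--     while iterator <= cell_counter - 1:
--
--         replacement_string = f'<input type="text" placeholder="Answer..." name="td-{iterator}"/>'
--         replacement_value = string_values[iterator]
--
--         new_content = new_content.replace(replacement_string, replacement_value)
--
--         iterator += 1
--
--     return new_content
-- ===== SOURCE B (Python) =====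
-- _PREFIX = '<input type="text" placeholder="Answer..." name="td-'
-- _SUFFIX = '"/>'
--
--
-- def replace_table(table, content, form_dict):
--     lookup = {}
--     for index, value in enumerate(form_dict.values()):
--         lookup[str(index)] = value[0]
--     pieces = []
--     pos = 0
--     while pos < len(content):
--         ch = content[pos]
--         if ch == '<' and content.startswith(_PREFIX, pos):
--             digits_end = pos + len(_PREFIX)
--             while digits_end < len(content) and content[digits_end].isdigit():
--                 digits_end += 1
--             digits = content[pos + len(_PREFIX):digits_end]
--             if digits in lookup and content.startswith(_SUFFIX, digits_end):
--                 pieces.append(lookup[digits])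
--                 pos = digits_end + len(_SUFFIX)
--                 continue
--         pieces.append(ch)
--         pos += 1
--     return ''.join(pieces)
-- ===== Notes on version B (the rewrite author's own statement) =====
-- stated objective: faster
-- what changed: Instead of one full-content replace() pass per form value (n sequential passes), B builds a str(index)->value dictionary once and makes a single left-to-right scan of content, substituting each td-i placeholder as it is found.
import Mathlib
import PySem

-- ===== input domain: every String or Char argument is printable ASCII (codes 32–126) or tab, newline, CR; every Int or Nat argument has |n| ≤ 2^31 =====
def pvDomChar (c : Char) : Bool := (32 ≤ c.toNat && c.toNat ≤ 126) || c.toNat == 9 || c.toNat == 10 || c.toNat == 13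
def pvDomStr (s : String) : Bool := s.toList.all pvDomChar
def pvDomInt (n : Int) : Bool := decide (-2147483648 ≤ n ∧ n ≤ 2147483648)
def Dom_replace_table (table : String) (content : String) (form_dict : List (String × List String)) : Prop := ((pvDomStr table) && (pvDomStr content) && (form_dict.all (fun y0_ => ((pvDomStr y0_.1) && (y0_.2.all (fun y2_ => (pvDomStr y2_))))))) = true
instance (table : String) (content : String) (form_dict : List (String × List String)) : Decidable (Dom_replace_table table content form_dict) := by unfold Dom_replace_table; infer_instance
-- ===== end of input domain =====

-- B replaces A's n full-content `.replace` passes (one per form value) by one dict build plus a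
-- single left-to-right scan of `content` substituting each `td-i` placeholder as it is found (faster).

-- ===== PORT A =====

-- while iterator <= cell_counter - 1: new_content = new_content.replace(f'<input ... td-{iterator}"/>', string_values[iterator])
def pvWhileA (sv : List String) (cc : Int) (nc : String) (it : Int) : String :=
  if _h : it ≤ cc - 1 then
    pvWhileA sv cc
      (PySem.Str.replace nc
        ("<input type=\"text\" placeholder=\"Answer...\" name=\"td-" ++ PySem.Int.toStr it ++ "\"/>")
        ((PySem.List.pyGet? sv it).getD ""))
      (it + 1)
  else nc
termination_by (cc - it).toNat
decreasing_by omega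

def replace_table (table : String) (content : String) (form_dict : List (String × List String)) : String :=
  let new_content := content
  let values := PySem.Dict.values (PySem.Dict.ofList form_dict)
  let string_values := values.foldl (fun acc v => acc ++ [(PySem.List.pyGet? v 0).getD ""]) []
  let cell_counter : Int := PySem.List.len string_values
  pvWhileA string_values cell_counter new_content 0

-- ===== PORT B =====

def pvPrefixC : List Char := "<input type=\"text\" placeholder=\"Answer...\" name=\"td-".toList
def pvSuffixC : List Char := "\"/>".toList

-- lookup = {}; for index, value in enumerate(form_dict.values()): lookup[str(index)] = value[0]
def pvLookupB (form_dict : List (String × List String)) : PySem.Dict String String :=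
  (PySem.List.enumerate (PySem.Dict.values (PySem.Dict.ofList form_dict))).foldl
    (fun d iv => d.insert (PySem.Int.toStr iv.1) ((PySem.List.pyGet? iv.2 0).getD ""))
    PySem.Dict.empty

-- the single scanning while-loop of Source B, over the character list (pos/jumps become suffix recursion)
def pvScanB (lk : PySem.Dict String String) : List Char → List Char
  | [] => []
  | c :: rest =>
    if c == '<' && pvPrefixC.isPrefixOf (c :: rest) then
      let after := (c :: rest).drop pvPrefixC.length
      let digits := after.takeWhile PySem.Chars.isdigit
      let rest2 := after.dropWhile PySem.Chars.isdigit
      if lk.contains (String.ofList digits) && pvSuffixC.isPrefixOf rest2 then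
        (lk.getD (String.ofList digits) "").toList ++ pvScanB lk (rest2.drop pvSuffixC.length)
      else c :: pvScanB lk rest
    else c :: pvScanB lk rest
termination_by cs => cs.length
decreasing_by
  · have h0 : 0 < pvPrefixC.length := by decide
    have h1 := List.length_dropWhile_le (p := PySem.Chars.isdigit) (l := (c :: rest).drop pvPrefixC.length)
    simp only [List.length_drop, List.length_cons] at h1 ⊢
    omega
  · simp
  · simp

def replace_table_alt (table : String) (content : String) (form_dict : List (String × List String)) : String :=
  String.ofList (pvScanB (pvLookupB form_dict) content.toList)

-- ===== PRECONDITION & SPEC =====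

def pvValsOf (form_dict : List (String × List String)) : List (List String) :=
  PySem.Dict.values (PySem.Dict.ofList form_dict)

def pvHeads (form_dict : List (String × List String)) : List String :=
  (pvValsOf form_dict).map (fun v => (PySem.List.pyGet? v 0).getD "")

def pvPatC (i : Nat) : List Char := pvPrefixC ++ Nat.toDigits 10 i ++ pvSuffixC

-- Pre_ excludes (1) dicts with an empty value list, on which A raises IndexError, and
-- (2) the accidental corner where content contains a placeholder while some form value itself embeds
-- placeholder-fragment text ('<', '>', or a substring of a placeholder): there A's sequential
-- replace passes may re-scan inserted values / newly formed placeholders — a behaviour neither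
-- implementation's reading of the task specifies.
def Pre_replace_table (table : String) (content : String) (form_dict : List (String × List String)) : Prop :=
  (∀ v ∈ pvValsOf form_dict, v ≠ []) ∧
  ((∀ j < (pvValsOf form_dict).length, ¬ pvPatC j <:+: content.toList) ∨
   (∀ s ∈ pvHeads form_dict,
      '<' ∉ s.toList ∧ '>' ∉ s.toList ∧
      ∀ j < (pvValsOf form_dict).length, ¬ s.toList <:+: pvPatC j))

instance (table : String) (content : String) (form_dict : List (String × List String)) : Decidable (Pre_replace_table table content form_dict) := by
  unfold Pre_replace_table; infer_instance

def pvWitness_replace_table : String × String × (List (String × List String)) :=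
  ("", "hello td-0", [("a", ["x"])])

def Spec_replace_table (table : String) (content : String) (form_dict : List (String × List String)) (out : String) : Prop := out = replace_table_alt table content form_dict
instance (table : String) (content : String) (form_dict : List (String × List String)) (out : String) : Decidable (Spec_replace_table table content form_dict out) := by unfold Spec_replace_table; infer_instance

-- ===== CLAIM (what is proved, stated in full; the proofs are below) =====
def Claim_equal_replace_table : Prop := ∀ (table : String) (content : String) (form_dict : List (String × List String)), Dom_replace_table table content form_dict → Pre_replace_table table content form_dict → Spec_replace_table table content form_dict (replace_table table content form_dict)

-- ===== LEMMAS AND PROOFS =====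

-- ---- decimal digit strings ----

def pvNatChars (n : Nat) : List Char :=
  if h : n < 10 then [Nat.digitChar n]
  else pvNatChars (n / 10) ++ [Nat.digitChar (n % 10)]
termination_by n
decreasing_by exact Nat.div_lt_self (by omega) (by omega)

theorem pv_toDigitsCore_eq (f : Nat) : ∀ (n : Nat) (acc : List Char), n < f →
    Nat.toDigitsCore 10 f n acc = pvNatChars n ++ acc := by
  induction f with
  | zero => intro n acc h; omega
  | succ f ih =>
    intro n acc h
    by_cases h10 : n < 10
    · have hdiv : n / 10 = 0 := Nat.div_eq_of_lt h10
      have hmod : n % 10 = n := Nat.mod_eq_of_lt h10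
      simp [Nat.toDigitsCore, hdiv, hmod, pvNatChars, h10]
    · have hdiv : ¬ n / 10 = 0 := by
        intro h0; have := Nat.div_eq_of_lt (by omega : n < 10 * 1); omega
      have hlt : n / 10 < f := by
        have := Nat.div_lt_self (by omega : 0 < n) (by omega : 1 < 10); omega
      rw [pvNatChars]
      simp only [Nat.toDigitsCore, hdiv, if_false, dif_neg h10]
      rw [ih (n / 10) _ hlt, List.append_assoc]
      rfl

theorem pv_toDigits_eq (n : Nat) : Nat.toDigits 10 n = pvNatChars n := by
  have := pv_toDigitsCore_eq (n + 1) n [] (by omega)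
  simpa [Nat.toDigits] using this

theorem pv_digitChar_isdigit (m : Nat) (h : m < 10) : PySem.Chars.isdigit (Nat.digitChar m) = true := by
  interval_cases m <;> decide

theorem pvNatChars_digits (n : Nat) : ∀ c ∈ pvNatChars n, PySem.Chars.isdigit c = true := by
  induction n using pvNatChars.induct with
  | case1 n h =>
    rw [pvNatChars, dif_pos h]
    intro c hc
    simp at hc
    subst hc
    exact pv_digitChar_isdigit n h
  | case2 n h ih =>
    rw [pvNatChars, dif_neg h]
    intro c hc
    rcases List.mem_append.mp hc with h1 | h2
    · exact ih c h1
    · simp at h2; subst h2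
      exact pv_digitChar_isdigit _ (Nat.mod_lt _ (by omega))

theorem pv_digitChar_toNat (m : Nat) (h : m < 10) : (Nat.digitChar m).toNat = 48 + m := by
  interval_cases m <;> decide

theorem pvNatChars_val (n : Nat) : ∀ a : Nat,
    (pvNatChars n).foldl (fun a c => 10 * a + (c.toNat - 48)) a = a * 10 ^ (pvNatChars n).length + n := by
  induction n using pvNatChars.induct with
  | case1 n h =>
    intro a
    rw [pvNatChars, dif_pos h]
    simp [pv_digitChar_toNat n h]
    ring
  | case2 n h ih =>
    intro a
    rw [pvNatChars, dif_neg h]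
    rw [List.foldl_append, ih a]
    have hm : n % 10 < 10 := Nat.mod_lt _ (by omega)
    simp [pv_digitChar_toNat _ hm, List.length_append, pow_succ]
    have : 10 * (a * 10 ^ (pvNatChars (n / 10)).length + n / 10) + n % 10
        = a * (10 ^ (pvNatChars (n / 10)).length * 10) + (10 * (n / 10) + n % 10) := by ring
    rw [this, Nat.div_add_mod]

theorem pvNatChars_inj {m n : Nat} (h : pvNatChars m = pvNatChars n) : m = n := by
  have hm := pvNatChars_val m 0
  have hn := pvNatChars_val n 0
  rw [h] at hm
  omega

theorem pv_toChars_natCast (i : Nat) : PySem.Int.toChars (i : Int) = pvNatChars i := by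
  simp [PySem.Int.toChars, pv_toDigits_eq]

-- ---- placeholder structure ----

def pvPatT (i : Nat) : List Char := pvPrefixC.tail ++ Nat.toDigits 10 i ++ pvSuffixC

theorem pvPatC_cons (i : Nat) : pvPatC i = '<' :: pvPatT i := by
  have h : pvPrefixC = '<' :: pvPrefixC.tail := by decide
  rw [pvPatC, pvPatT, h]
  simp

theorem pv_isdigit_ne (c d : Char) (hc : PySem.Chars.isdigit c = true)
    (hd : PySem.Chars.isdigit d = false) : c ≠ d := by
  intro h; rw [h, hd] at hc; exact Bool.false_ne_true hc

theorem pv_lt_not_mem_patT (i : Nat) : '<' ∉ pvPatT i := by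
  intro h
  rw [pvPatT] at h
  rcases List.mem_append.mp h with h1 | h2
  · rcases List.mem_append.mp h1 with h3 | h4
    · revert h3; decide
    · rw [pv_toDigits_eq] at h4
      exact pv_isdigit_ne _ '<' (pvNatChars_digits i _ h4) (by decide) rfl
  · revert h2; decide

theorem pv_patT_ne_nil (i : Nat) : pvPatT i ≠ [] := by
  rw [pvPatT]
  simp [pvSuffixC]

theorem pv_patC_concat (i : Nat) :
    pvPatC i = (pvPrefixC ++ Nat.toDigits 10 i ++ ['\"', '/']) ++ ['>'] := by
  have h : pvSuffixC = ['\"', '/'] ++ ['>'] := by decide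
  rw [pvPatC, h]
  simp

theorem pv_suffix_last (i : Nat) (r : List Char) (hr : r <:+ pvPatC i) (hne : r ≠ []) :
    ∃ r', r = r' ++ ['>'] := by
  obtain ⟨u1, hu⟩ := hr
  rcases (List.eq_nil_or_concat r) with h | ⟨r', x, hx⟩
  · exact absurd h hne
  · subst hx
    rw [pv_patC_concat, List.concat_eq_append, ← List.append_assoc] at hu
    obtain ⟨-, h2⟩ := List.append_inj' hu (by simp)
    simp at h2
    subst h2
    exact ⟨r', by simp⟩

theorem pv_digits_prefix_cancel :
    ∀ (a b : List Char) (x y : Char) (u w : List Char),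
      (∀ c ∈ a, PySem.Chars.isdigit c = true) → (∀ c ∈ b, PySem.Chars.isdigit c = true) →
      PySem.Chars.isdigit x = false → PySem.Chars.isdigit y = false →
      (a ++ x :: u) <+: (b ++ y :: w) → a = b := by
  intro a
  induction a with
  | nil =>
    intro b x y u w _ hb hx _ h
    cases b with
    | nil => rfl
    | cons d b' =>
      exfalso
      simp only [List.nil_append, List.cons_append] at h
      obtain ⟨hxd, -⟩ := List.cons_prefix_cons.mp h
      exact pv_isdigit_ne d x (hb d (by simp)) hx hxd.symm
  | cons c a' ih =>
    intro b x y u w ha hb hx hy h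
    cases b with
    | nil =>
      exfalso
      simp only [List.cons_append, List.nil_append] at h
      obtain ⟨hcy, -⟩ := List.cons_prefix_cons.mp h
      exact pv_isdigit_ne c y (ha c (by simp)) hy hcy
    | cons d b' =>
      simp only [List.cons_append] at h
      obtain ⟨hcd, htl⟩ := List.cons_prefix_cons.mp h
      have := ih b' x y u w (fun e he => ha e (by simp [he])) (fun e he => hb e (by simp [he])) hx hy htl
      rw [hcd, this]

theorem pv_pat_not_prefix (i j : Nat) (hij : i ≠ j) (w : List Char) :
    ¬ pvPatC i <+: (pvPatC j ++ w) := by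
  intro h
  have hs : pvSuffixC = '\"' :: ['/', '>'] := by decide
  rw [pvPatC, pvPatC, hs] at h
  rw [List.append_assoc, List.append_assoc, List.append_assoc] at h
  rw [List.prefix_append_right_inj] at h
  rw [← List.append_assoc] at h
  have heq : Nat.toDigits 10 i = Nat.toDigits 10 j := by
    refine pv_digits_prefix_cancel _ _ '\"' '\"' ['/', '>'] (['/', '>'] ++ w) ?_ ?_ (by decide) (by decide) ?_
    · rw [pv_toDigits_eq]; exact pvNatChars_digits i
    · rw [pv_toDigits_eq]; exact pvNatChars_digits j
    · rw [List.append_assoc] at h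
      exact h
  rw [pv_toDigits_eq, pv_toDigits_eq] at heq
  exact hij (pvNatChars_inj heq)

-- ---- structural characterisation of PySem.Chars.replace ----

def pvRepl (o : Char) (p v : List Char) : List Char → List Char
  | [] => []
  | c :: t =>
    if (o :: p) <+: (c :: t) then v ++ pvRepl o p v (t.drop p.length)
    else c :: pvRepl o p v t
termination_by cs => cs.length
decreasing_by
  · simp only [List.length_drop, List.length_cons]; omega
  · simp

theorem pvRepl_nil (o : Char) (p v : List Char) : pvRepl o p v [] = [] := by
  simp [pvRepl]

theorem pvRepl_skip (o : Char) (p v : List Char) (c : Char) (t : List Char)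
    (h : ¬ (o :: p) <+: (c :: t)) : pvRepl o p v (c :: t) = c :: pvRepl o p v t := by
  rw [pvRepl]; simp [h]

theorem pvRepl_match (o : Char) (p v u : List Char) :
    pvRepl o p v ((o :: p) ++ u) = v ++ pvRepl o p v u := by
  have hpre : (o :: p) <+: (o :: (p ++ u)) := by
    rw [← List.cons_append]; exact List.prefix_append _ _
  rw [List.cons_append, pvRepl, if_pos hpre, List.drop_left]

theorem pv_go_eq (o : Char) (p v : List Char) :
    ∀ (fuel : Nat) (l acc : List Char), l.length ≤ fuel →
      PySem.Chars.replace.go (o :: p) v fuel l acc = acc.reverse ++ pvRepl o p v l := by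
  intro fuel
  induction fuel with
  | zero =>
    intro l acc h
    have : l = [] := List.eq_nil_of_length_eq_zero (by omega)
    subst this
    simp [PySem.Chars.replace.go, pvRepl_nil]
  | succ f ih =>
    intro l acc h
    cases l with
    | nil => simp [PySem.Chars.replace.go, pvRepl_nil]
    | cons c t =>
      by_cases hp : (o :: p) <+: (c :: t)
      · have hb : (o :: p).isPrefixOf (c :: t) = true := List.isPrefixOf_iff_prefix.mpr hp
        rw [show PySem.Chars.replace.go (o :: p) v (f + 1) (c :: t) acc =
              if (o :: p).isPrefixOf (c :: t) = true then
                PySem.Chars.replace.go (o :: p) v f (List.drop (o :: p).length (c :: t)) (v.reverse ++ acc)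
              else PySem.Chars.replace.go (o :: p) v f t (c :: acc) from rfl]
        rw [if_pos hb]
        have hlen : (List.drop (o :: p).length (c :: t)).length ≤ f := by
          simp only [List.length_drop, List.length_cons] at *
          omega
        rw [ih _ _ hlen]
        obtain ⟨u, hu⟩ := hp
        rw [← hu]
        rw [pvRepl_match]
        have hdrop : List.drop (o :: p).length ((o :: p) ++ u) = u := List.drop_left
        rw [hdrop]
        simp
      · have hb : (o :: p).isPrefixOf (c :: t) = false := by
          rw [Bool.eq_false_iff]
          intro hcon
          exact hp (List.isPrefixOf_iff_prefix.mp hcon)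
        rw [show PySem.Chars.replace.go (o :: p) v (f + 1) (c :: t) acc =
              if (o :: p).isPrefixOf (c :: t) = true then
                PySem.Chars.replace.go (o :: p) v f (List.drop (o :: p).length (c :: t)) (v.reverse ++ acc)
              else PySem.Chars.replace.go (o :: p) v f t (c :: acc) from rfl]
        rw [if_neg (by simp [hb])]
        have hlen : t.length ≤ f := by simp at h; omega
        rw [ih _ _ hlen, pvRepl_skip _ _ _ _ _ hp]
        simp

theorem pv_replace_eq (o : Char) (p v s : List Char) :
    PySem.Chars.replace s (o :: p) v = pvRepl o p v s := by
  rw [show PySem.Chars.replace s (o :: p) v =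
        if (o :: p).isEmpty = true then v ++ List.flatMap (fun c => c :: v) s
        else PySem.Chars.replace.go (o :: p) v s.length s [] from rfl]
  rw [if_neg (by simp)]
  rw [pv_go_eq o p v s.length s [] le_rfl]
  simp

-- ---- pass-through lemmas ----

theorem pvRepl_append (o : Char) (p v : List Char) :
    ∀ (u w : List Char), (∀ u2, u2 <:+ u → u2 ≠ [] → ¬ (o :: p) <+: (u2 ++ w)) →
      pvRepl o p v (u ++ w) = u ++ pvRepl o p v w := by
  intro u w
  induction u with
  | nil => intro _; simp
  | cons c u' ih =>
    intro hcond
    have hskip : ¬ (o :: p) <+: (c :: (u' ++ w)) := by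
      have := hcond (c :: u') List.suffix_rfl (by simp)
      simpa using this
    rw [List.cons_append, pvRepl_skip _ _ _ _ _ hskip,
        ih (fun u2 hs hne => hcond u2 (hs.trans (List.suffix_cons c u')) hne)]
    simp

theorem pvRepl_pass_noLt (p v : List Char) (u w : List Char) (hu : '<' ∉ u) :
    pvRepl '<' p v (u ++ w) = u ++ pvRepl '<' p v w := by
  apply pvRepl_append
  intro u2 hs hne hpre
  cases u2 with
  | nil => exact hne rfl
  | cons a u3 =>
    obtain ⟨ha, -⟩ := List.cons_prefix_cons.mp (by simpa using hpre)
    exact hu (hs.subset (by simp [← ha]))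

theorem pvRepl_pass_pat (i k : Nat) (hik : i ≠ k) (v w : List Char) :
    pvRepl '<' (pvPatT i) v (pvPatC k ++ w) = pvPatC k ++ pvRepl '<' (pvPatT i) v w := by
  apply pvRepl_append
  intro u2 hs hne hpre
  by_cases hwhole : u2 = pvPatC k
  · subst hwhole
    rw [← pvPatC_cons] at hpre
    exact pv_pat_not_prefix i k hik w hpre
  · have hs' : u2 <:+ pvPatT k := by
      rw [pvPatC_cons] at hs
      rcases List.suffix_cons_iff.mp hs with h | h
      · exact absurd (by rw [h, ← pvPatC_cons]) hwhole
      · exact h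
    cases u2 with
    | nil => exact hne rfl
    | cons a u3 =>
      obtain ⟨ha, -⟩ := List.cons_prefix_cons.mp (by simpa using hpre)
      exact pv_lt_not_mem_patT k (hs'.subset (by simp [← ha]))

theorem pvRepl_self (o : Char) (p v : List Char) :
    ∀ s, ¬ (o :: p) <:+: s → pvRepl o p v s = s := by
  intro s
  induction s with
  | nil => intro _; exact pvRepl_nil o p v
  | cons c t ih =>
    intro h
    have hp : ¬ (o :: p) <+: (c :: t) := fun hc => h hc.isInfix
    rw [pvRepl_skip _ _ _ _ _ hp, ih (fun hc => h (List.infix_cons hc))]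

-- ---- prefix preservation (lemmas N and M) ----

theorem pvRepl_suffix_prefix (j i : Nat) (v : List Char)
    (hgt : '>' ∉ v) (hinf : ¬ v <:+: pvPatC j) :
    ∀ s r, r <:+ pvPatC j → r ≠ pvPatC j → r ≠ [] →
      r <+: pvRepl '<' (pvPatT i) v s → r <+: s := by
  have main : ∀ (m : Nat) (s : List Char), s.length ≤ m → ∀ r, r <:+ pvPatC j → r ≠ pvPatC j →
      r ≠ [] → r <+: pvRepl '<' (pvPatT i) v s → r <+: s := by
    intro m
    induction m with
    | zero =>
      intro s hs r _ _ hne hpre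
      have : s = [] := List.eq_nil_of_length_eq_zero (by omega)
      subst this
      rw [pvRepl_nil] at hpre
      exact absurd (List.prefix_nil.mp hpre) hne
    | succ m ih =>
      intro s hs r hsuf hproper hne hpre
      cases s with
      | nil =>
        rw [pvRepl_nil] at hpre
        exact absurd (List.prefix_nil.mp hpre) hne
      | cons c t =>
        by_cases hp : ('<' :: pvPatT i) <+: (c :: t)
        · obtain ⟨u, hu⟩ := hp
          rw [← hu, pvRepl_match] at hpre
          exfalso
          by_cases hlen : r.length ≤ v.length
          · have hrv : r <+: v :=
              List.prefix_of_prefix_length_le hpre (List.prefix_append v _) hlen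
            obtain ⟨r', hr'⟩ := pv_suffix_last j r hsuf hne
            exact hgt (hrv.subset (by rw [hr']; simp))
          · have hvr : v <+: r :=
              List.prefix_of_prefix_length_le (List.prefix_append v _) hpre (by omega)
            exact hinf (hvr.isInfix.trans hsuf.isInfix)
        · rw [pvRepl_skip _ _ _ _ _ hp] at hpre
          cases r with
          | nil => exact absurd rfl hne
          | cons a r' =>
            obtain ⟨ha, hr'⟩ := List.cons_prefix_cons.mp hpre
            subst ha
            by_cases hr'nil : r' = []
            · subst hr'nil
              exact List.cons_prefix_cons.mpr ⟨rfl, List.nil_prefix⟩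
            · have hsuf' : r' <:+ pvPatC j := (List.suffix_cons a r').trans hsuf
              have hproper' : r' ≠ pvPatC j := by
                intro he
                have hlen1 : (a :: r').length ≤ (pvPatC j).length := hsuf.length_le
                rw [← he] at hlen1
                simp at hlen1
              have := ih t (by simp at hs; omega) r' hsuf' hproper' hr'nil hr'
              exact List.cons_prefix_cons.mpr ⟨rfl, this⟩
  intro s
  exact main s.length s le_rfl

theorem pvRepl_pat_prefix (j i : Nat) (v : List Char)
    (hlt : '<' ∉ v) (hgt : '>' ∉ v) (hinf : ¬ v <:+: pvPatC j) :
    ∀ s, pvPatC j <+: pvRepl '<' (pvPatT i) v s → pvPatC j <+: s := by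
  intro s
  induction s with
  | nil =>
    intro hpre
    rw [pvRepl_nil] at hpre
    have := List.prefix_nil.mp hpre
    rw [pvPatC_cons] at this
    exact absurd this (by simp)
  | cons c t ih =>
    intro hpre
    by_cases hp : ('<' :: pvPatT i) <+: (c :: t)
    · obtain ⟨u, hu⟩ := hp
      rw [← hu, pvRepl_match] at hpre
      exfalso
      by_cases hlen : (pvPatC j).length ≤ v.length
      · have hrv : pvPatC j <+: v :=
          List.prefix_of_prefix_length_le hpre (List.prefix_append v _) hlen
        exact hlt (hrv.subset (by rw [pvPatC_cons]; simp))
      · have hvr : v <+: pvPatC j :=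
          List.prefix_of_prefix_length_le (List.prefix_append v _) hpre (by omega)
        exact hinf hvr.isInfix
    · rw [pvRepl_skip _ _ _ _ _ hp] at hpre
      rw [pvPatC_cons] at hpre
      obtain ⟨hc, htl⟩ := List.cons_prefix_cons.mp hpre
      subst hc
      have : pvPatT j <+: t := by
        apply pvRepl_suffix_prefix j i v hgt hinf t (pvPatT j)
        · rw [pvPatC_cons]; exact List.suffix_cons _ _
        · intro he
          have := congrArg List.length he
          rw [pvPatC_cons] at this
          simp at this
        · exact pv_patT_ne_nil j
        · exact htl
      rw [pvPatC_cons]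
      exact List.cons_prefix_cons.mpr ⟨rfl, this⟩

-- ---- the A-side fold ----

def pvVal (sv : List String) (i : Nat) : List Char :=
  ((PySem.List.pyGet? sv (i : Int)).getD "").toList

def pvStep (sv : List String) (cs : List Char) (i : Nat) : List Char :=
  pvRepl '<' (pvPatT i) (pvVal sv i) cs

def pvFoldA (sv : List String) (cs : List Char) : List Char :=
  (List.range' 0 sv.length 1).foldl (pvStep sv) cs

theorem pv_patStr_toList (k : Nat) :
    ("<input type=\"text\" placeholder=\"Answer...\" name=\"td-" ++ PySem.Int.toStr (k : Int) ++ "\"/>").toList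
      = '<' :: pvPatT k := by
  rw [← pvPatC_cons]
  simp only [String.toList_append, PySem.Int.toList_toStr, pv_toChars_natCast]
  rw [pvPatC, pv_toDigits_eq]
  rfl

theorem pv_whileA_eq (sv : List String) :
    ∀ (d : Nat) (k : Nat) (nc : String), d = sv.length - k → k ≤ sv.length →
      pvWhileA sv (sv.length : Int) nc (k : Int) =
        String.ofList ((List.range' k d 1).foldl (pvStep sv) nc.toList) := by
  intro d
  induction d with
  | zero =>
    intro k nc hd hk
    have hkl : k = sv.length := by omega
    subst hkl
    rw [pvWhileA, dif_neg (by omega)]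
    rw [show List.range' sv.length 0 1 = [] from rfl, List.foldl_nil, String.ofList_toList]
  | succ d ih =>
    intro k nc hd hk
    have hklt : k < sv.length := by omega
    rw [pvWhileA, dif_pos (by
      have : (k : Int) < (sv.length : Int) := by exact_mod_cast hklt
      omega)]
    have hcast : (k : Int) + 1 = ((k + 1 : Nat) : Int) := by push_cast; ring
    rw [hcast, ih (k + 1) _ (by omega) (by omega)]
    rw [List.range'_succ, List.foldl_cons]
    have hrepl : (PySem.Str.replace nc
        ("<input type=\"text\" placeholder=\"Answer...\" name=\"td-" ++ PySem.Int.toStr (k : Int) ++ "\"/>")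
        ((PySem.List.pyGet? sv (k : Int)).getD "")).toList = pvStep sv nc.toList k := by
      rw [PySem.Str.replace, String.toList_ofList, pv_patStr_toList]
      rw [pv_replace_eq]
      rfl
    rw [hrepl]


theorem pv_fold_heads : ∀ (l : List (List String)) (acc : List String),
    l.foldl (fun acc v => acc ++ [(PySem.List.pyGet? v 0).getD ""]) acc
      = acc ++ l.map (fun v => (PySem.List.pyGet? v 0).getD "") := by
  intro l
  induction l with
  | nil => intro acc; simp
  | cons v t ih => intro acc; rw [List.foldl_cons, ih]; simp

theorem pv_A_eq (table content : String) (form_dict : List (String × List String)) :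
    replace_table table content form_dict =
      String.ofList (pvFoldA (pvHeads form_dict) content.toList) := by
  have hmain := pv_whileA_eq (pvHeads form_dict) (pvHeads form_dict).length 0 content (by omega) (by omega)
  rw [Nat.cast_zero] at hmain
  rw [replace_table]
  simp only [pv_fold_heads, List.nil_append]
  rw [PySem.List.len_eq]
  exact hmain

-- ---- lookup characterisation ----

theorem pv_toStr_natCast_inj {i j : Nat} (h : PySem.Int.toStr (i : Int) = PySem.Int.toStr (j : Int)) : i = j := by
  have := congrArg String.toList h
  rw [PySem.Int.toList_toStr, PySem.Int.toList_toStr, pv_toChars_natCast, pv_toChars_natCast] at this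
  exact pvNatChars_inj this

theorem pv_enumerate_eq {α : Type} : ∀ (l : List α) (k : Nat),
    PySem.List.enumerate l (k : Int) = (l.zipIdx k).map (fun p => ((p.2 : Int), p.1)) := by
  intro l
  induction l with
  | nil => intro k; simp [PySem.List.enumerate]
  | cons x t ih =>
    intro k
    rw [List.zipIdx_cons, List.map_cons]
    rw [show PySem.List.enumerate (x :: t) (k : Int) = ((k : Int), x) :: PySem.List.enumerate t ((k : Int) + 1) from rfl]
    rw [show ((k : Int) + 1) = ((k + 1 : Nat) : Int) from by push_cast; ring]
    rw [ih (k + 1)]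

theorem pv_lookupB_items (form_dict : List (String × List String)) :
    (pvLookupB form_dict).items =
      ((pvHeads form_dict).zipIdx 0).map (fun p => (PySem.Int.toStr (p.2 : Int), p.1)) := by
  rw [pvLookupB]
  have he := pv_enumerate_eq (PySem.Dict.values (PySem.Dict.ofList form_dict)) 0
  rw [Nat.cast_zero] at he
  rw [he]
  have hnodup : (((PySem.Dict.ofList form_dict).values.zipIdx.map
      (fun p => ((p.2 : Int), p.1))).map (fun iv : Int × List String => PySem.Int.toStr iv.1)).Nodup := by
    rw [List.map_map]
    have : ((fun iv : Int × List String => PySem.Int.toStr iv.1) ∘ (fun p : List String × Nat => ((p.2 : Int), p.1)))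
        = (fun p : List String × Nat => PySem.Int.toStr (p.2 : Int)) := rfl
    rw [this]
    have h2 : (fun p : List String × Nat => PySem.Int.toStr (p.2 : Int))
        = (fun i : Nat => PySem.Int.toStr (i : Int)) ∘ Prod.snd := rfl
    rw [h2, ← List.map_map, List.zipIdx_map_snd]
    apply List.Nodup.map
    · intro a b hab
      exact pv_toStr_natCast_inj hab
    · exact List.nodup_range'
  have hf := PySem.Dict.items_foldl_insert_fresh
      (l := ((PySem.Dict.ofList form_dict).values.zipIdx.map (fun p => ((p.2 : Int), p.1))))
      (k := fun iv => PySem.Int.toStr iv.1)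
      (v := fun iv => (PySem.List.pyGet? iv.2 0).getD "")
      (d := PySem.Dict.empty) (fun a _ => rfl) hnodup
  simp only [] at hf
  rw [hf]
  rw [List.map_map]
  rw [show (PySem.Dict.empty : PySem.Dict String String).items = [] from rfl, List.nil_append]
  rw [pvHeads, pvValsOf, List.zipIdx_map, List.map_map]
  rfl

theorem pv_find_zip (sv : List String) :
    ∀ (k i : Nat) (hi : i < sv.length),
      List.find? (fun pr => pr.1 == PySem.Int.toStr ((k + i : Nat) : Int))
        ((sv.zipIdx k).map (fun p => (PySem.Int.toStr (p.2 : Int), p.1)))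
      = some (PySem.Int.toStr ((k + i : Nat) : Int), sv[i]) := by
  induction sv with
  | nil => intro k i hi; simp at hi
  | cons a t ih =>
    intro k i hi
    rw [List.zipIdx_cons, List.map_cons]
    cases i with
    | zero =>
      rw [List.find?_cons]
      simp
    | succ n =>
      rw [List.find?_cons]
      have hne : (PySem.Int.toStr ((k : Nat) : Int) == PySem.Int.toStr ((k + (n + 1) : Nat) : Int)) = false := by
        rw [beq_eq_false_iff_ne]
        intro hcon
        have := pv_toStr_natCast_inj hcon
        omega
      have hrec := ih (k + 1) n (by simpa using hi)
      rw [show (k + 1) + n = k + (n + 1) from by omega] at hrec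
      push_cast at hne hrec ⊢
      simp [hne, hrec]

theorem pv_lookup_get (form_dict : List (String × List String)) (i : Nat)
    (hi : i < (pvHeads form_dict).length) :
    (pvLookupB form_dict).get? (PySem.Int.toStr (i : Int)) = some ((pvHeads form_dict)[i]) := by
  rw [PySem.Dict.get?, pv_lookupB_items]
  have := pv_find_zip (pvHeads form_dict) 0 i hi
  rw [show (0 + i : Nat) = i from by omega] at this
  rw [this]
  rfl

theorem pv_lookup_inv (form_dict : List (String × List String)) (key : String)
    (h : (pvLookupB form_dict).contains key = true) :
    ∃ i, i < (pvHeads form_dict).length ∧ key = PySem.Int.toStr (i : Int) := by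
  rw [PySem.Dict.contains, pv_lookupB_items, List.any_eq_true] at h
  obtain ⟨pr, hmem, hpred⟩ := h
  rw [List.mem_map] at hmem
  obtain ⟨q, hq, rfl⟩ := hmem
  obtain ⟨q1, q2⟩ := q
  obtain ⟨-, hlt, -⟩ := List.mem_zipIdx hq
  refine ⟨q2, by omega, ?_⟩
  have : PySem.Int.toStr ((q2 : Nat) : Int) = key := by exact beq_iff_eq.mp hpred
  exact this.symm

-- ---- scan lemmas ----

theorem pv_takeWhile_all (p : Char → Bool) :
    ∀ (u w : List Char), (∀ c ∈ u, p c = true) → (u ++ w).takeWhile p = u ++ w.takeWhile p := by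
  intro u w
  induction u with
  | nil => intro _; simp
  | cons c u' ih =>
    intro h
    rw [List.cons_append, List.takeWhile_cons_of_pos (h c (by simp)), ih (fun d hd => h d (by simp [hd]))]
    rfl

theorem pv_dropWhile_all (p : Char → Bool) :
    ∀ (u w : List Char), (∀ c ∈ u, p c = true) → (u ++ w).dropWhile p = w.dropWhile p := by
  intro u w
  induction u with
  | nil => intro _; simp
  | cons c u' ih =>
    intro h
    rw [List.cons_append, List.dropWhile_cons_of_pos (h c (by simp)), ih (fun d hd => h d (by simp [hd]))]

theorem pv_contains_of_get? (d : PySem.Dict String String) (key v : String)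
    (h : d.get? key = some v) : d.contains key = true := by
  rw [PySem.Dict.get?] at h
  rw [PySem.Dict.contains, List.any_eq_true]
  cases hf : List.find? (fun p => p.1 == key) d.items with
  | none => rw [hf] at h; simp at h
  | some pr => exact ⟨pr, List.mem_of_find?_eq_some hf, by simpa using List.find?_some hf⟩

theorem pv_key_eq (k : Nat) : String.ofList (Nat.toDigits 10 k) = PySem.Int.toStr (k : Int) := by
  rw [PySem.Int.toStr, pv_toChars_natCast, pv_toDigits_eq]

theorem pv_scan_match (form_dict : List (String × List String)) (k : Nat)
    (hk : k < (pvHeads form_dict).length) (t : List Char) :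
    pvScanB (pvLookupB form_dict) (pvPatC k ++ t) =
      ((pvHeads form_dict)[k]).toList ++ pvScanB (pvLookupB form_dict) t := by
  have hsuf3 : pvSuffixC = '\"' :: ['/', '>'] := by decide
  have hx : pvPatC k ++ t = '<' :: (pvPatT k ++ t) := by rw [pvPatC_cons]; rfl
  have hshape : pvPatC k ++ t = pvPrefixC ++ (Nat.toDigits 10 k ++ (pvSuffixC ++ t)) := by
    rw [pvPatC, List.append_assoc, List.append_assoc]
  rw [hx, pvScanB]
  have hpre : pvPrefixC.isPrefixOf ('<' :: (pvPatT k ++ t)) = true := by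
    rw [List.isPrefixOf_iff_prefix, ← hx, hshape]
    exact List.prefix_append _ _
  rw [if_pos (by simp [hpre])]
  have hdrop : ('<' :: (pvPatT k ++ t)).drop pvPrefixC.length
      = Nat.toDigits 10 k ++ (pvSuffixC ++ t) := by
    rw [← hx, hshape, List.drop_left]
  simp only [hdrop]
  have hdigall : ∀ c ∈ Nat.toDigits 10 k, PySem.Chars.isdigit c = true := by
    rw [pv_toDigits_eq]; exact pvNatChars_digits k
  have htake : (Nat.toDigits 10 k ++ (pvSuffixC ++ t)).takeWhile PySem.Chars.isdigit
      = Nat.toDigits 10 k := by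
    rw [pv_takeWhile_all _ _ _ hdigall, hsuf3, List.cons_append,
        List.takeWhile_cons_of_neg (by decide), List.append_nil]
  have hdropw : (Nat.toDigits 10 k ++ (pvSuffixC ++ t)).dropWhile PySem.Chars.isdigit
      = pvSuffixC ++ t := by
    rw [pv_dropWhile_all _ _ _ hdigall, hsuf3, List.cons_append,
        List.dropWhile_cons_of_neg (by decide)]
  simp only [htake, hdropw, pv_key_eq]
  have hget := pv_lookup_get form_dict k hk
  rw [if_pos (by
    simp [pv_contains_of_get? _ _ _ hget, List.isPrefixOf_iff_prefix.mpr (List.prefix_append pvSuffixC t)])]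
  rw [PySem.Dict.getD, hget, List.drop_left]
  rfl

theorem pv_scan_nomatch (form_dict : List (String × List String)) (c : Char) (t : List Char)
    (habs : ∀ j < (pvHeads form_dict).length, ¬ pvPatC j <+: (c :: t)) :
    pvScanB (pvLookupB form_dict) (c :: t) = c :: pvScanB (pvLookupB form_dict) t := by
  rw [pvScanB]
  by_cases h1 : (c == '<' && pvPrefixC.isPrefixOf (c :: t)) = true
  · rw [if_pos h1]
    by_cases h2 : ((pvLookupB form_dict).contains
        (String.ofList (((c :: t).drop pvPrefixC.length).takeWhile PySem.Chars.isdigit)) &&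
        pvSuffixC.isPrefixOf (((c :: t).drop pvPrefixC.length).dropWhile PySem.Chars.isdigit)) = true
    · exfalso
      rw [Bool.and_eq_true] at h1 h2
      obtain ⟨-, hpre⟩ := h1
      obtain ⟨hcont, hsufpre⟩ := h2
      obtain ⟨i, hi, hkey⟩ := pv_lookup_inv form_dict _ hcont
      have hdig : ((c :: t).drop pvPrefixC.length).takeWhile PySem.Chars.isdigit
          = Nat.toDigits 10 i := by
        have := congrArg String.toList hkey
        rw [String.toList_ofList, PySem.Int.toList_toStr, pv_toChars_natCast, ← pv_toDigits_eq] at this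
        exact this
      obtain ⟨u, hu⟩ := List.isPrefixOf_iff_prefix.mp hpre
      obtain ⟨t2, ht2⟩ := List.isPrefixOf_iff_prefix.mp hsufpre
      have hafter : (c :: t).drop pvPrefixC.length = u := by rw [← hu, List.drop_left]
      have hsplit : (c :: t) = pvPrefixC ++ (Nat.toDigits 10 i ++ (pvSuffixC ++ t2)) := by
        rw [← hu]
        congr 1
        rw [← List.takeWhile_append_dropWhile (p := PySem.Chars.isdigit) (l := u), ← hafter, hdig, ht2]
      exact habs i hi (by
        rw [hsplit, pvPatC, List.append_assoc, List.prefix_append_right_inj, List.prefix_append_right_inj]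
        exact List.prefix_append _ _)
    · rw [if_neg h2]
  · rw [if_neg h1]

theorem pv_scan_self (form_dict : List (String × List String)) :
    ∀ s, (∀ j < (pvHeads form_dict).length, ¬ pvPatC j <:+: s) →
      pvScanB (pvLookupB form_dict) s = s := by
  intro s
  induction s with
  | nil => intro _; rw [pvScanB]
  | cons c t ih =>
    intro h
    rw [pv_scan_nomatch form_dict c t (fun j hj hpre => h j hj hpre.isInfix),
        ih (fun j hj hin => h j hj (List.infix_cons hin))]

-- ---- the main induction ----

theorem pv_fold_nil (sv : List String) : ∀ L : List Nat, L.foldl (pvStep sv) [] = [] := by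
  intro L
  induction L with
  | nil => rfl
  | cons i L' ih => rw [List.foldl_cons, show pvStep sv [] i = [] from pvRepl_nil _ _ _, ih]

theorem pv_fold_pass_pat (sv : List String) (k : Nat) :
    ∀ (L : List Nat), (∀ i ∈ L, i ≠ k) → ∀ w,
      L.foldl (pvStep sv) (pvPatC k ++ w) = pvPatC k ++ L.foldl (pvStep sv) w := by
  intro L
  induction L with
  | nil => intro _ w; rfl
  | cons i L' ih =>
    intro h w
    rw [List.foldl_cons, List.foldl_cons,
        show pvStep sv (pvPatC k ++ w) i = pvPatC k ++ pvStep sv w i from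
          pvRepl_pass_pat i k (h i (by simp)) _ w,
        ih (fun i hi => h i (by simp [hi]))]

theorem pv_fold_pass_noLt (sv : List String) (u : List Char) (hu : '<' ∉ u) :
    ∀ (L : List Nat) (w : List Char),
      L.foldl (pvStep sv) (u ++ w) = u ++ L.foldl (pvStep sv) w := by
  intro L
  induction L with
  | nil => intro w; rfl
  | cons i L' ih =>
    intro w
    rw [List.foldl_cons, List.foldl_cons,
        show pvStep sv (u ++ w) i = u ++ pvStep sv w i from pvRepl_pass_noLt _ _ u w hu, ih]

theorem pv_val_toList (sv : List String) (k : Nat) (hk : k < sv.length) :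
    pvVal sv k = (sv[k]).toList := by
  rw [pvVal, PySem.List.pyGet?_natCast, List.getElem?_eq_getElem hk]
  rfl

theorem pv_patC_length_pos (k : Nat) : 0 < (pvPatC k).length := by
  rw [pvPatC_cons]; simp

theorem pv_fold_cons (sv : List String)
    (hv : ∀ s ∈ sv, '<' ∉ s.toList ∧ '>' ∉ s.toList ∧ ∀ j < sv.length, ¬ s.toList <:+: pvPatC j) :
    ∀ (L : List Nat), (∀ i ∈ L, i < sv.length) → ∀ (c : Char) (t : List Char),
      (∀ j < sv.length, ¬ pvPatC j <+: (c :: t)) →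
      L.foldl (pvStep sv) (c :: t) = c :: L.foldl (pvStep sv) t := by
  intro L
  induction L with
  | nil => intro _ c t _; rfl
  | cons i L' ih =>
    intro hL c t habs
    have hi : i < sv.length := hL i (by simp)
    have hcond := hv (sv[i]) (List.getElem_mem hi)
    rw [← pv_val_toList sv i hi] at hcond
    have hskip : ¬ ('<' :: pvPatT i) <+: (c :: t) := by
      rw [← pvPatC_cons]; exact habs i hi
    have hstep : pvStep sv (c :: t) i = c :: pvStep sv t i := pvRepl_skip _ _ _ _ _ hskip
    rw [List.foldl_cons, List.foldl_cons, hstep]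
    apply ih (fun j hj => hL j (by simp [hj])) c (pvStep sv t i)
    intro j hj hpre
    rw [show (c :: pvStep sv t i) = pvStep sv (c :: t) i from hstep.symm] at hpre
    exact habs j hj (pvRepl_pat_prefix j i (pvVal sv i) hcond.1 hcond.2.1 (hcond.2.2 j hj) _ hpre)

theorem pv_foldA_split (sv : List String) (k : Nat) (hk : k < sv.length)
    (hvk : '<' ∉ pvVal sv k) (u : List Char) :
    pvFoldA sv (pvPatC k ++ u) = pvVal sv k ++ pvFoldA sv u := by
  have hdec : List.range' 0 sv.length 1 = List.range' 0 k 1 ++ (k :: List.range' (k + 1) (sv.length - k - 1) 1) := by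
    have h1 : List.range' 0 k 1 ++ List.range' (0 + 1 * k) (sv.length - k) 1 = List.range' 0 (k + (sv.length - k)) 1 :=
      List.range'_append
    rw [show k + (sv.length - k) = sv.length from by omega] at h1
    have h2 : List.range' (0 + 1 * k) (sv.length - k) 1
        = k :: List.range' (k + 1) (sv.length - k - 1) 1 := by
      rw [show 0 + 1 * k = k from by omega,
          show sv.length - k = (sv.length - k - 1) + 1 from by omega, List.range'_succ]
      simp
    rw [← h1, h2]
  have hmem1 : ∀ i ∈ List.range' 0 k 1, i ≠ k := by
    intro i hi
    have := List.mem_range'_1.mp hi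
    omega
  have hstepk : ∀ w, pvStep sv (pvPatC k ++ w) k = pvVal sv k ++ pvStep sv w k := by
    intro w
    rw [pvPatC_cons, pvStep]
    exact pvRepl_match '<' (pvPatT k) (pvVal sv k) w
  rw [pvFoldA, pvFoldA, hdec, List.foldl_append, List.foldl_append,
      pv_fold_pass_pat sv k _ hmem1,
      List.foldl_cons, List.foldl_cons, hstepk,
      pv_fold_pass_noLt sv _ hvk]

theorem pv_core (form_dict : List (String × List String))
    (hv : ∀ s ∈ pvHeads form_dict,
      '<' ∉ s.toList ∧ '>' ∉ s.toList ∧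
      ∀ j < (pvHeads form_dict).length, ¬ s.toList <:+: pvPatC j) :
    ∀ cs, pvFoldA (pvHeads form_dict) cs = pvScanB (pvLookupB form_dict) cs := by
  have hv' : ∀ s ∈ pvHeads form_dict, '<' ∉ s.toList ∧ '>' ∉ s.toList ∧
      ∀ j < (pvHeads form_dict).length, ¬ s.toList <:+: pvPatC j := hv
  have main : ∀ (m : Nat) (cs : List Char), cs.length ≤ m →
      pvFoldA (pvHeads form_dict) cs = pvScanB (pvLookupB form_dict) cs := by
    intro m
    induction m with
    | zero =>
      intro cs hcs
      have : cs = [] := List.eq_nil_of_length_eq_zero (by omega)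
      subst this
      rw [pvFoldA, pv_fold_nil, pvScanB]
    | succ m ih =>
      intro cs hcs
      by_cases hex : ∃ k, k < (pvHeads form_dict).length ∧ pvPatC k <+: cs
      · obtain ⟨k, hk, u, hu⟩ := hex
        subst hu
        have hval := pv_val_toList (pvHeads form_dict) k hk
        have hcond := hv' ((pvHeads form_dict)[k]) (List.getElem_mem hk)
        have hA := pv_foldA_split (pvHeads form_dict) k hk (by rw [hval]; exact hcond.1) u
        rw [hA, pv_scan_match form_dict k hk u, hval,
            ih u (by
              have := pv_patC_length_pos k
              simp only [List.length_append] at hcs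
              omega)]
      · push Not at hex
        cases cs with
        | nil => rw [pvFoldA, pv_fold_nil, pvScanB]
        | cons c t =>
          have habs : ∀ j < (pvHeads form_dict).length, ¬ pvPatC j <+: (c :: t) := by
            intro j hj hpre
            exact hex j hj hpre
          rw [pvFoldA, pv_fold_cons (pvHeads form_dict) hv' _ (fun i hi => by have := (List.mem_range'_1.mp hi).2; omega) c t habs,
              pv_scan_nomatch form_dict c t habs]
          have := ih t (by simp at hcs; omega)
          rw [pvFoldA] at this
          rw [this]
  intro cs
  exact main cs.length cs le_rfl

theorem pv_foldA_self (sv : List String) (cs : List Char)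
    (h : ∀ j < sv.length, ¬ pvPatC j <:+: cs) : pvFoldA sv cs = cs := by
  rw [pvFoldA]
  have : ∀ L : List Nat, (∀ i ∈ L, i < sv.length) → L.foldl (pvStep sv) cs = cs := by
    intro L
    induction L with
    | nil => intro _; rfl
    | cons i L' ih =>
      intro hL
      have hstep : pvStep sv cs i = cs := by
        rw [pvStep]
        apply pvRepl_self
        rw [← pvPatC_cons]
        exact h i (hL i (by simp))
      rw [List.foldl_cons, hstep, ih (fun j hj => hL j (by simp [hj]))]
  exact this _ (fun i hi => by have := (List.mem_range'_1.mp hi).2; omega)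

-- ===== VERDICT (by name: the statement is the Claim_ definition above) =====
theorem replace_table_spec : Claim_equal_replace_table := by
  unfold Claim_equal_replace_table
  intro table content form_dict _hdom hpre
  unfold Spec_replace_table
  obtain ⟨-, hbr⟩ := hpre
  have hlen : (pvValsOf form_dict).length = (pvHeads form_dict).length := by
    rw [pvHeads, List.length_map]
  rw [pv_A_eq table content form_dict, replace_table_alt]
  cases hbr with
  | inl h1 =>
    rw [pv_foldA_self (pvHeads form_dict) content.toList (fun j hj => h1 j (by omega)),
        pv_scan_self form_dict content.toList (fun j hj => h1 j (by omega))]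
  | inr h2 =>
    exact congrArg String.ofList
      (pv_core form_dict (fun s hs => ⟨(h2 s hs).1, (h2 s hs).2.1,
        fun j hj => (h2 s hs).2.2 j (by omega)⟩) content.toList)
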